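-- pv_equiv track=rewrite | github.com/xshlxy/TIP101 | Unit-3/s2p6.py | sum_of_unique_elements
-- ===== SOURCE A (Python) =====
-- def sum_of_unique_elements(lst1, lst2):
-- 	seen = {}
-- 	total = 0
-- 	if not lst1:
-- 		return 0
-- 	for num in lst1:
-- 		if num in seen:
-- 			seen[num]+=1
-- 		if num not in seen and num not in lst2:
-- 			seen[num]=1
--
--
-- 	for key,value in seen.items():
-- 		if value == 1:
-- 			total += key
--
-- 	return total
-- ===== SOURCE B (Python) =====
-- def sum_of_unique_elements(lst1, lst2):
--     # Worklist partition scheme: repeatedly take the first remaining value,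
--     # split the rest into its duplicates and everything else; the value is
--     # summed when it has no duplicates and is absent from lst2, and all of
--     # its copies are discarded before the next round.
--     total = 0
--     rest = list(lst1)
--     while rest:
--         x = rest[0]
--         tail = rest[1:]
--         dups = [y for y in tail if y == x]
--         if not dups and x not in lst2:
--             total += x
--         rest = [y for y in tail if y != x]
--     return total
-- ===== Notes on version B (the rewrite author's own statement) =====
-- stated objective: alternative
-- what changed: Replaced A's frequency-dictionary build followed by an items scan with a worklist partition loop: repeatedly pop the first remaining value, partition the rest into its duplicates and the residue, add the value when it has no duplicates and is absent from lst2, and continue on the residue (no counting table is ever built).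
import Mathlib
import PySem

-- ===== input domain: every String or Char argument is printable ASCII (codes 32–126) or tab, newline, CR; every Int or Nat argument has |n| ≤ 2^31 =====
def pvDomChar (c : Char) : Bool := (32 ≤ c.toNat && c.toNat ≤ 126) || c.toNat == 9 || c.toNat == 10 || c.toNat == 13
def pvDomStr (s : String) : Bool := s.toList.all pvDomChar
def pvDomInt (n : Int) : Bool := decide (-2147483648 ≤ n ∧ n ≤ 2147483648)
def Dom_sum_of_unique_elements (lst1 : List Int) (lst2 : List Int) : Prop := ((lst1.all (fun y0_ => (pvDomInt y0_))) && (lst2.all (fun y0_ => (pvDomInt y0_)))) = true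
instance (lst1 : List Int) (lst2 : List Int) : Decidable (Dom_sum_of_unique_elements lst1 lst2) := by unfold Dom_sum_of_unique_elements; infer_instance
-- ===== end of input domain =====

-- B replaces A's frequency-dictionary build + items scan with a worklist partition loop:
-- pop the first remaining value, split the rest into its duplicates and the residue, add
-- the value when it has no duplicates and is absent from lst2 (objective: alternative).

-- ===== PORT A =====
-- the body of A's first for-loop, as written (two sequential ifs over the dict `seen`)
def stepA (lst2 : List Int) (s : PySem.Dict Int Int) (num : Int) : PySem.Dict Int Int :=
  let s1 := if s.contains num then s.modify num 0 (· + 1) else s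
  if !s1.contains num && !lst2.contains num then s1.insert num 1 else s1

def sum_of_unique_elements (lst1 : List Int) (lst2 : List Int) : Int :=
  if lst1 = [] then 0
  else
    let seen := lst1.foldl (stepA lst2) PySem.Dict.empty
    seen.items.foldl (fun total kv => if kv.2 = 1 then total + kv.1 else total) 0

-- ===== PORT B =====
-- the while-loop of Source B: total is the accumulator, rest the shrinking worklist
def altLoop (lst2 : List Int) (total : Int) (rest : List Int) : Int :=
  match rest with
  | [] => total
  | x :: tail =>
    let dups := tail.filter (fun y => y == x)
    let total' := if dups = [] ∧ lst2.contains x = false then total + x else total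
    altLoop lst2 total' (tail.filter (fun y => !(y == x)))
termination_by rest.length
decreasing_by
  refine Nat.lt_of_le_of_lt ?_ (Nat.lt_succ_self _)
  simpa using List.length_filter_le _ tail.attach

def sum_of_unique_elements_alt (lst1 : List Int) (lst2 : List Int) : Int :=
  altLoop lst2 0 lst1

-- ===== PRECONDITION & SPEC =====
def Spec_sum_of_unique_elements (lst1 : List Int) (lst2 : List Int) (out : Int) : Prop := out = sum_of_unique_elements_alt lst1 lst2
instance (lst1 : List Int) (lst2 : List Int) (out : Int) : Decidable (Spec_sum_of_unique_elements lst1 lst2 out) := by unfold Spec_sum_of_unique_elements; infer_instance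

-- ===== CLAIM (what is proved, stated in full; the proofs are below) =====
def Claim_equal_sum_of_unique_elements : Prop := ∀ (lst1 : List Int) (lst2 : List Int), Dom_sum_of_unique_elements lst1 lst2 → Spec_sum_of_unique_elements lst1 lst2 (sum_of_unique_elements lst1 lst2)

-- ===== LEMMAS AND PROOFS =====

-- common intermediate form: the guarded sum over the distinct values of lst1
def dSum (lst2 : List Int) (l : List Int) (acc : Int) : Int :=
  (PySem.Set.ofList l).foldl
    (fun a x => if l.count x = 1 ∧ lst2.contains x = false then a + x else a) acc

-- A's loop tabulates only elements absent from lst2, and for those it is exactly the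
-- Counter step folded over lst1 with the lst2-elements filtered away.
theorem loopA_eq (lst2 : List Int) : ∀ (xs : List Int) (d : PySem.Dict Int Int),
    (∀ k, d.contains k = true → k ∉ lst2) →
    xs.foldl (stepA lst2) d
    = (xs.filter (fun x => !lst2.contains x)).foldl
        (fun (d : PySem.Dict Int Int) x => d.modify x 0 (· + 1)) d := by
  intro xs
  induction xs with
  | nil => intro d _; rfl
  | cons x xs ih =>
    intro d hd
    by_cases h2 : x ∈ lst2
    · have hc : d.contains x = false := by
        cases hcc : d.contains x with
        | false => rfl
        | true => exact absurd h2 (hd x hcc)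
      have hstep : stepA lst2 d x = d := by simp [stepA, hc, h2]
      have hfil : (x :: xs).filter (fun x => !lst2.contains x)
          = xs.filter (fun x => !lst2.contains x) := by simp [h2]
      rw [List.foldl_cons, hstep, hfil]
      exact ih d hd
    · have hstep : stepA lst2 d x = d.modify x 0 (· + 1) := by
        by_cases hc : d.contains x = true
        · simp [stepA, PySem.Dict.modify, hc]
        · have hcf : d.contains x = false := by revert hc; cases d.contains x <;> simp
          have hg : d.getD x 0 = 0 := PySem.Dict.getD_of_not_contains d 0 hcf
          simp [stepA, PySem.Dict.modify, hcf, h2, hg]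
      have hd' : ∀ k, (d.modify x 0 (· + 1)).contains k = true → k ∉ lst2 := by
        intro k hk
        rw [PySem.Dict.modify, PySem.Dict.contains_insert] at hk
        rcases Bool.or_eq_true_iff.mp hk with h | h
        · have : k = x := by simpa using h
          simpa [this] using h2
        · exact hd k h
      have hfil : (x :: xs).filter (fun x => !lst2.contains x)
          = x :: xs.filter (fun x => !lst2.contains x) := by simp [h2]
      rw [List.foldl_cons, hstep, hfil, List.foldl_cons]
      exact ih _ hd'

-- first-occurrence dedup (set(…)) commutes with filter
theorem ofList_filter (p : Int → Bool) : ∀ (l : List Int) (s : PySem.Set Int),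
    (l.filter p).foldl PySem.Set.add (s.filter p) = (l.foldl PySem.Set.add s).filter p := by
  intro l
  induction l with
  | nil => intro s; rfl
  | cons x l ih =>
    intro s
    by_cases hc : x ∈ s
    · by_cases hp : p x = true
      · have hadd : PySem.Set.add (s.filter p) x = (PySem.Set.add s x).filter p := by
          simp [PySem.Set.add, List.mem_filter, hc, hp]
        have hfil : (x :: l).filter p = x :: l.filter p := by simp [hp]
        rw [hfil, List.foldl_cons, hadd]; exact ih _
      · have hpf : p x = false := by revert hp; cases p x <;> simp
        have hadd : s.filter p = (PySem.Set.add s x).filter p := by simp [PySem.Set.add, hc]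
        have hfil : (x :: l).filter p = l.filter p := by simp [hpf]
        rw [hfil, hadd]; exact ih _
    · by_cases hp : p x = true
      · have hadd : PySem.Set.add (s.filter p) x = (PySem.Set.add s x).filter p := by
          simp [PySem.Set.add, List.mem_filter, hc, hp, List.filter_append]
        have hfil : (x :: l).filter p = x :: l.filter p := by simp [hp]
        rw [hfil, List.foldl_cons, hadd]; exact ih _
      · have hpf : p x = false := by revert hp; cases p x <;> simp
        have hadd : s.filter p = (PySem.Set.add s x).filter p := by
          simp [PySem.Set.add, hc, List.filter_append, hpf]
        have hfil : (x :: l).filter p = l.filter p := by simp [hpf]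
        rw [hfil, hadd]; exact ih _

-- summing with guard q over a filtered list = summing with guard q ∧ p over the full list
theorem foldl_filter_if (p : Int → Bool) (q : Int → Prop) [DecidablePred q] :
    ∀ (l : List Int) (acc : Int),
    (l.filter p).foldl (fun a x => if q x then a + x else a) acc
      = l.foldl (fun a x => if q x ∧ p x = true then a + x else a) acc := by
  intro l
  induction l with
  | nil => intro acc; rfl
  | cons x l ih =>
    intro acc
    by_cases hp : p x = true
    · by_cases hq : q x
      · simp [hp, hq, ih]
      · simp [hp, hq, ih]
    · have hpf : p x = false := by revert hp; cases p x <;> simp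
      simp [hpf, ih]

-- A equals the guarded distinct-value sum
theorem aEq (lst1 lst2 : List Int) : sum_of_unique_elements lst1 lst2 = dSum lst2 lst1 0 := by
  unfold sum_of_unique_elements dSum
  by_cases hnil : lst1 = []
  · subst hnil; rfl
  · rw [if_neg hnil]
    show (lst1.foldl (stepA lst2) PySem.Dict.empty).items.foldl
        (fun total kv => if kv.2 = 1 then total + kv.1 else total) 0 = _
    rw [loopA_eq lst2 lst1 PySem.Dict.empty
        (by intro k hk; rw [PySem.Dict.contains_empty] at hk; exact absurd hk (by simp))]
    rw [← PySem.Dict.counter_eq_foldl, PySem.Dict.items_counter, List.foldl_map]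
    have hof : PySem.Set.ofList (lst1.filter (fun x => !lst2.contains x))
        = (PySem.Set.ofList lst1).filter (fun x => !lst2.contains x) := by
      simpa [PySem.Set.ofList_eq_foldl] using
        ofList_filter (fun x => !lst2.contains x) lst1 []
    rw [hof]
    rw [foldl_filter_if (fun x => !lst2.contains x)
        (fun k => ((lst1.filter (fun x => !lst2.contains x)).count k : Int) = 1)
        (PySem.Set.ofList lst1) 0]
    refine PySem.List.foldl_congr_mem _ _ _ _ ?_
    intro a x _
    by_cases h2 : x ∈ lst2
    · simp [h2]
    · have hcnt : (lst1.filter (fun x => !lst2.contains x)).count x = lst1.count x :=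
        List.count_filter (by simp [h2])
      rw [hcnt]; simp [h2, Nat.cast_eq_one]

-- appending new distinct elements never disturbs an already-collected head
theorem foldl_add_cons (x : Int) : ∀ (l : List Int) (s : PySem.Set Int),
    (∀ y ∈ l, y ≠ x) →
    l.foldl PySem.Set.add (x :: s) = x :: l.foldl PySem.Set.add s := by
  intro l
  induction l with
  | nil => intro s _; rfl
  | cons y l ih =>
    intro s hy
    have hyx : y ≠ x := hy y (by simp)
    have ihl : ∀ z ∈ l, z ≠ x := fun z hz => hy z (by simp [hz])
    by_cases hm : y ∈ s
    · have hadd1 : PySem.Set.add (x :: s) y = x :: s := by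
        simp [PySem.Set.add, PySem.Set.contains, hm]
      have hadd2 : PySem.Set.add s y = s := by
        simp [PySem.Set.add, PySem.Set.contains, hm]
      rw [List.foldl_cons, hadd1, List.foldl_cons, hadd2, ih _ ihl]
    · have hadd1 : PySem.Set.add (x :: s) y = x :: (s ++ [y]) := by
        simp [PySem.Set.add, PySem.Set.contains, hm, hyx]
      have hadd2 : PySem.Set.add s y = s ++ [y] := by
        simp [PySem.Set.add, PySem.Set.contains, hm]
      rw [List.foldl_cons, hadd1, List.foldl_cons, hadd2, ih _ ihl]

-- adding an element already present, and its later copies, is a no-op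
theorem foldl_add_filter_ne (x : Int) : ∀ (l : List Int) (s : PySem.Set Int), x ∈ s →
    l.foldl PySem.Set.add s = (l.filter (fun y => !(y == x))).foldl PySem.Set.add s := by
  intro l
  induction l with
  | nil => intro s _; rfl
  | cons y l ih =>
    intro s hs
    by_cases hyx : y = x
    · subst hyx
      have hns : PySem.Set.add s y = s := by
        simp [PySem.Set.add, PySem.Set.contains, hs]
      have hfil : (y :: l).filter (fun z => !(z == y)) = l.filter (fun z => !(z == y)) := by
        simp
      rw [List.foldl_cons, hns, hfil]
      exact ih s hs
    · have hmem : x ∈ PySem.Set.add s y := by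
        simp [PySem.Set.add]; split_ifs <;> simp [hs]
      have hfil : (y :: l).filter (fun z => !(z == x))
          = y :: l.filter (fun z => !(z == x)) := by
        simp [hyx]
      rw [List.foldl_cons, hfil, List.foldl_cons]
      exact ih _ hmem

-- set(x :: tail) = x :: set(tail with the copies of x removed)
theorem ofList_cons (x : Int) (tail : List Int) :
    PySem.Set.ofList (x :: tail)
      = x :: PySem.Set.ofList (tail.filter (fun y => !(y == x))) := by
  have h1 : PySem.Set.ofList (x :: tail) = tail.foldl PySem.Set.add [x] := by
    simp [PySem.Set.ofList_eq_foldl, PySem.Set.add, PySem.Set.contains]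
  rw [h1, foldl_add_filter_ne x tail [x] (by simp),
      foldl_add_cons x _ [] (by intro y hy; simpa using (List.of_mem_filter hy))]
  rfl

-- B's worklist loop computes the guarded distinct-value sum
theorem altLoop_eq (lst2 : List Int) : ∀ (n : Nat) (l : List Int), l.length ≤ n →
    ∀ acc, altLoop lst2 acc l = dSum lst2 l acc := by
  intro n
  induction n with
  | zero =>
    intro l hl acc
    have : l = [] := List.length_eq_zero_iff.mp (Nat.le_zero.mp hl)
    subst this
    rw [altLoop.eq_def]; rfl
  | succ n ih =>
    intro l hl acc
    match l with
    | [] => rw [altLoop.eq_def]; rfl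
    | x :: tail =>
      have hstep : altLoop lst2 acc (x :: tail)
          = altLoop lst2
              (if tail.filter (fun y => y == x) = [] ∧ lst2.contains x = false then acc + x
               else acc)
              (tail.filter (fun y => !(y == x))) := by
        rw [altLoop.eq_def]
      rw [hstep]
      have hlen : (tail.filter (fun y => !(y == x))).length ≤ n :=
        le_trans (List.length_filter_le _ _) (by simpa using Nat.le_of_succ_le_succ hl)
      rw [ih _ hlen]
      unfold dSum
      rw [ofList_cons, List.foldl_cons]
      -- the guard at the head: count x (x::tail) = 1 ↔ no duplicates of x in tail
      have hcnt : ((x :: tail).count x = 1) ↔ (tail.filter (fun y => y == x) = []) := by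
        simp only [List.count_cons_self, List.filter_eq_nil_iff, beq_iff_eq]
        constructor
        · intro h a ha he
          subst he
          have := List.count_pos_iff.mpr ha
          omega
        · intro h
          have : tail.count x = 0 := List.count_eq_zero.mpr (fun hx => h x hx rfl)
          omega
      rw [if_congr (and_congr_left fun _ => hcnt.symm) rfl rfl]
      -- on every surviving distinct element y ≠ x the two counts agree
      refine PySem.List.foldl_congr_mem _ _ _ _ ?_
      intro a y hy
      have hyx : y ≠ x := by
        have := (PySem.List.mem_dedup _ y).mp hy
        simpa using (List.of_mem_filter this)
      have : (tail.filter (fun y => !(y == x))).count y = (x :: tail).count y := by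
        rw [List.count_filter (by simp [hyx]), List.count_cons]
        simp [Ne.symm hyx]
      rw [this]

-- ===== VERDICT (by name: the statement is the Claim_ definition above) =====
theorem sum_of_unique_elements_spec : Claim_equal_sum_of_unique_elements := by
  intro lst1 lst2 _
  unfold Spec_sum_of_unique_elements sum_of_unique_elements_alt
  rw [aEq, altLoop_eq lst2 lst1.length lst1 le_rfl 0]
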